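-- pv_equiv track=rewrite | github.com/kschweig/take_it_easy | source/environment.py | sum_of_equals
-- ===== SOURCE A (Python) =====
-- def sum_of_equals(values):
--     reward = 0
--     first = 0
--     i = 0
--     for val in values:
--         if val == 0:
--             continue
--         else:
--             if first == 0:
--                 first = val
--             elif first != val:
--                 return 0
--             reward += val
--             i += 1
--
--     if i == 1:
--         return 0
--
--     return reward
-- ===== SOURCE B (Python) =====
-- def sum_of_equals(values):
--     counts = {}
--     for v in values:
--         if v != 0:
--             counts[v] = counts.get(v, 0) + 1
--     if len(counts) != 1:
--         return 0
--     (v, c), = counts.items()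
--     return v * c if c > 1 else 0
-- ===== Notes on version B (the rewrite author's own statement) =====
-- stated objective: alternative
-- what changed: Replaces A's single stateful early-exit scan (running sum, remembered first value, counter) by building a dictionary of multiplicities of the nonzero values once and then reading the answer off the dict: exactly one key with count > 1 yields value * count, anything else yields 0; no running sum and no early exit.
import Mathlib
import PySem

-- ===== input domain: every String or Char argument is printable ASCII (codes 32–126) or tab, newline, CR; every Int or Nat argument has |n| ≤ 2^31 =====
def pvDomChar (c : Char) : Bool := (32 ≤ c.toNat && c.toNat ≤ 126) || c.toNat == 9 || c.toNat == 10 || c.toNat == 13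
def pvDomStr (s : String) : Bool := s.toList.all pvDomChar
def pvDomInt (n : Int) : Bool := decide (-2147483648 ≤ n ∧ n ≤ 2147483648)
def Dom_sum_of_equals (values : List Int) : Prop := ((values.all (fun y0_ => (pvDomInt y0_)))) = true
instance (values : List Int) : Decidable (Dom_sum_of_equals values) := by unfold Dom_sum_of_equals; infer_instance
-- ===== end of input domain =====

-- B replaces A's stateful early-exit scan by a dictionary of multiplicities built once,
-- returning value * count instead of a running sum (objective: alternative; same O(n)).

-- ===== PORT A =====
-- the for-loop with state (reward, first, i); the 'return 0' on mismatch is the 0 branch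
def sumLoopA : List Int → Int → Int → Int → Int
  | [], reward, _, i => if i == 1 then 0 else reward
  | v :: rest, reward, first, i =>
    if v == 0 then sumLoopA rest reward first i
    else if first == 0 then sumLoopA rest (reward + v) v (i + 1)
    else if first != v then 0
    else sumLoopA rest (reward + v) first (i + 1)

def sum_of_equals (values : List Int) : Int := sumLoopA values 0 0 0

-- ===== PORT B =====
def sum_of_equals_alt (values : List Int) : Int :=
  let counts := values.foldl
    (fun d v => if v != 0 then d.insert v (d.getD v 0 + 1) else d) PySem.Dict.empty
  if counts.size ≠ 1 then 0
  else match counts.items with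
    | [(v, c)] => if c > 1 then v * c else 0
    | _ => 0

-- ===== PRECONDITION & SPEC =====
def Spec_sum_of_equals (values : List Int) (out : Int) : Prop := out = sum_of_equals_alt values
instance (values : List Int) (out : Int) : Decidable (Spec_sum_of_equals values out) := by unfold Spec_sum_of_equals; infer_instance

-- ===== CLAIM (what is proved, stated in full; the proofs are below) =====
def Claim_equal_sum_of_equals : Prop := ∀ (values : List Int), Dom_sum_of_equals values → Spec_sum_of_equals values (sum_of_equals values)

-- ===== LEMMAS AND PROOFS =====

-- once a nonzero `first` is fixed, the loop returns r + sum of the remaining nonzeros iff they all equal first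
theorem sumLoopA_inv (l : List Int) (f : Int) (hf : f ≠ 0) :
    ∀ (r i : Int), sumLoopA l r f i =
      if (l.filter (fun v => v != 0)).all (fun x => x == f)
      then (if i + ((l.filter (fun v => v != 0)).length : Int) = 1 then 0
            else r + (l.filter (fun v => v != 0)).sum)
      else 0 := by
  induction l with
  | nil => intro r i; simp [sumLoopA]
  | cons v rest ih =>
    intro r i
    by_cases hv : v = 0
    · subst hv; simpa [sumLoopA] using ih r i
    · by_cases hvf : v = f
      · subst hvf
        rw [show sumLoopA (v :: rest) r v i = sumLoopA rest (r + v) v (i + 1) by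
              simp [sumLoopA, hv]]
        rw [ih (r + v) (i + 1)]
        simp only [List.filter_cons]
        simp [hv]
        split_ifs with h1 h2 h3 <;> push_cast at * <;> omega
      · have : sumLoopA (v :: rest) r f i = 0 := by
          simp [sumLoopA, hv, hf, bne]
          intro h; exact absurd h.symm hvf
        rw [this]
        simp [hv, hvf]

-- a nodup list whose elements all equal v and which contains v is [v]
theorem nodup_all_eq (s : List Int) (v : Int) (hn : s.Nodup) (hv : v ∈ s)
    (hall : ∀ x ∈ s, x = v) : s = [v] := by
  cases s with
  | nil => cases hv
  | cons a t =>
    have ha : a = v := hall a (List.mem_cons_self)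
    subst ha
    have ht : t = [] := by
      cases t with
      | nil => rfl
      | cons b u =>
        have hb : b = a := hall b (by simp)
        subst hb
        simp [List.nodup_cons] at hn
    simp [ht]

-- set-cardinality-1 ↔ all elements equal the head
theorem setLen_one_iff (v : Int) (l : List Int) :
    ((PySem.Set.ofList (v :: l)).length = 1) ↔ (l.all (fun x => x == v)) := by
  constructor
  · intro h
    have hv : v ∈ PySem.Set.ofList (v :: l) := by
      rw [PySem.Set.mem_ofList]; exact List.mem_cons_self
    obtain ⟨x, hx⟩ : ∃ x, PySem.Set.ofList (v :: l) = [x] :=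
      List.length_eq_one_iff.mp h
    have hxv : x = v := by
      rw [hx] at hv; exact (List.mem_singleton.mp hv).symm
    have hx' : PySem.Set.ofList (v :: l) = [v] := by rw [hx, hxv]
    simp only [List.all_eq_true, beq_iff_eq]
    intro y hy
    have hm : y ∈ PySem.Set.ofList (v :: l) := by
      rw [PySem.Set.mem_ofList]; exact List.mem_cons_of_mem _ hy
    rw [hx'] at hm; exact List.mem_singleton.mp hm
  · intro h
    have hall : ∀ x ∈ PySem.Set.ofList (v :: l), x = v := by
      intro x hx
      rw [PySem.Set.mem_ofList] at hx
      rcases List.mem_cons.mp hx with h1 | h1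
      · exact h1
      · simpa using (List.all_eq_true.mp h) x h1
    have := nodup_all_eq _ v (PySem.Set.nodup_ofList _)
      (by rw [PySem.Set.mem_ofList]; exact List.mem_cons_self) hall
    rw [this]; rfl

-- B's fold-with-guard is Counter of the nonzeros; its result depends only on the filtered list
theorem alt_eq_counter (values : List Int) :
    sum_of_equals_alt values =
      (let its := (PySem.Dict.counter (values.filter (fun v => v != 0))).items
       if its.length ≠ 1 then 0
       else match its with
         | [(v, c)] => if c > 1 then v * c else 0
         | _ => 0) := by
  have h : values.foldl
      (fun d v => if v != 0 then d.insert v (d.getD v 0 + 1) else d) PySem.Dict.empty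
      = PySem.Dict.counter (values.filter (fun v => v != 0)) := by
    rw [← PySem.Dict.foldl_insert_getD_add_one_eq_counter, List.foldl_filter]
  simp only [sum_of_equals_alt, h, PySem.Dict.size]

-- main equivalence
theorem main_eq (l : List Int) : sumLoopA l 0 0 0 = sum_of_equals_alt l := by
  rw [alt_eq_counter]
  simp only [PySem.Dict.items_counter]
  induction l with
  | nil => simp [sumLoopA]
  | cons v rest ih =>
    by_cases hv : v = 0
    · subst hv
      rw [show sumLoopA (0 :: rest) 0 0 0 = sumLoopA rest 0 0 0 by simp [sumLoopA]]
      rw [ih]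
      simp
    · rw [show sumLoopA (v :: rest) 0 0 0 = sumLoopA rest (0 + v) v (0 + 1) by
          simp [sumLoopA, hv]]
      rw [sumLoopA_inv rest v hv]
      simp only [List.filter_cons, show (v != 0) = true by simp [hv], if_pos]
      set fl := rest.filter (fun x => x != 0) with hfl
      by_cases hall : fl.all (fun x => x == v)
      · -- all nonzeros equal v: the set is [v], count is the full length
        have hset : PySem.Set.ofList (v :: fl) = [v] := by
          apply nodup_all_eq _ v (PySem.Set.nodup_ofList _)
          · rw [PySem.Set.mem_ofList]; exact List.mem_cons_self
          · intro x hx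
            rw [PySem.Set.mem_ofList] at hx
            rcases List.mem_cons.mp hx with h1 | h1
            · exact h1
            · simpa using (List.all_eq_true.mp hall) x h1
        have hcount : (v :: fl).count v = (v :: fl).length := by
          rw [List.count_eq_length]
          intro b hb
          rcases List.mem_cons.mp hb with h1 | h1
          · exact h1.symm
          · exact ((beq_iff_eq).mp ((List.all_eq_true.mp hall) b h1)).symm
        have hsum : fl.sum = (fl.length : Int) * v := by
          have := List.sum_eq_card_nsmul fl v
            (fun x hx => (beq_iff_eq).mp ((List.all_eq_true.mp hall) x hx))
          simpa [nsmul_eq_mul] using this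
        rw [if_pos hall, hset]
        simp only [List.map_cons, List.map_nil, List.length_cons, List.length_nil,
          hcount, List.length_cons]
        by_cases hnil : fl.length = 0
        · have : fl = [] := List.length_eq_zero_iff.mp hnil
          simp [this]
        · rw [if_neg (show ¬((0:Int) + 1 + (fl.length : Int) = 1) by push_cast; omega)]
          rw [if_neg (by simp)]
          rw [if_pos (show ((((fl.length + 1 : Nat)) : Int) > 1) by push_cast; omega)]
          rw [hsum]; push_cast; ring
      · -- not all equal: set has length ≠ 1, B returns 0 via the size guard
        have hlen : ((PySem.Set.ofList (v :: fl)).map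
            (fun k => (k, ((v :: fl).count k : Int)))).length ≠ 1 := by
          rw [List.length_map]
          intro h
          exact hall ((setLen_one_iff v fl).mp h)
        rw [if_neg hall, if_pos hlen]

-- ===== VERDICT (by name: the statement is the Claim_ definition above) =====
theorem sum_of_equals_spec : Claim_equal_sum_of_equals := by
  intro values _
  show sum_of_equals values = sum_of_equals_alt values
  exact main_eq values
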